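-- pv_equiv track=rewrite | github.com/Omarmubx7/mubxbot | scripts/parse_office_hours.py | join_split_lines
-- ===== SOURCE A (Python) =====
-- def join_split_lines(lines):
--     result = []
--     i = 0
--     while i < len(lines):
--         if lines[i].strip() == 'Office' and i+1 < len(lines) and lines[i+1].strip() == 'Hours':
--             result.append('Office Hours')
--             i += 2
--         else:
--             result.append(lines[i])
--             i += 1
--     return result
-- ===== SOURCE B (Python) =====
-- def join_split_lines(lines):
--     result = []
--     for line in lines:
--         if line.strip() == 'Hours' and result and result[-1].strip() == 'Office':
--             result[-1] = 'Office Hours'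
--         else:
--             result.append(line)
--     return result
-- ===== Notes on version B (the rewrite author's own statement) =====
-- stated objective: simpler
-- what changed: Replaces A's indexed while-loop with one-step lookahead and i+=2 skipping by a single index-free for-loop that looks back at the accumulator: a stripped 'Hours' line merges into a preceding stripped 'Office' by rewriting result[-1].
import Mathlib
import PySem

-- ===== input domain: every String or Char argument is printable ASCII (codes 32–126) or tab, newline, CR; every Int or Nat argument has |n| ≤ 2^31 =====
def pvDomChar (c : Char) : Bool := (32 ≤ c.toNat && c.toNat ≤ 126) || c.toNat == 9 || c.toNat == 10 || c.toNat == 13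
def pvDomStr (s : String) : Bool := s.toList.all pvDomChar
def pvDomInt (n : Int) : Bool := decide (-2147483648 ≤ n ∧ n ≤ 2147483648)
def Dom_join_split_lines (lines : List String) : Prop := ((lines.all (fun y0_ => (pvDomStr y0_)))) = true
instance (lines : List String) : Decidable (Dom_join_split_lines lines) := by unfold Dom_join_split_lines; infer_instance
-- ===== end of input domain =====

-- B replaces A's indexed lookahead loop (i += 2 on a merge) by an index-free pass
-- that merges a stripped 'Hours' line into a preceding stripped 'Office' by
-- rewriting the accumulator's last element; objective: simpler.

-- ===== PORT A =====
-- A's while loop over index i consumes two lines on a merge, one otherwise;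
-- ported as the obvious structural recursion on the remaining suffix.
def join_split_lines (lines : List String) : List String :=
  match lines with
  | [] => []
  | [x] => [x]
  | x :: y :: rest =>
      if PySem.Str.strip x == "Office" && PySem.Str.strip y == "Hours" then
        "Office Hours" :: join_split_lines rest
      else
        x :: join_split_lines (y :: rest)

-- ===== PORT B =====
-- B's result list is kept reversed (head = Python's result[-1]) and reversed at the end.
def join_split_lines_step (acc : List String) (line : String) : List String :=
  match acc with
  | h :: t =>
      if PySem.Str.strip line == "Hours" && PySem.Str.strip h == "Office" then
        "Office Hours" :: t
      else
        line :: h :: t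
  | [] => [line]

def join_split_lines_alt (lines : List String) : List String :=
  (lines.foldl join_split_lines_step []).reverse

-- ===== PRECONDITION & SPEC =====
def Spec_join_split_lines (lines : List String) (out : List String) : Prop := out = join_split_lines_alt lines
instance (lines : List String) (out : List String) : Decidable (Spec_join_split_lines lines out) := by unfold Spec_join_split_lines; infer_instance

-- ===== CLAIM (what is proved, stated in full; the proofs are below) =====
def Claim_equal_join_split_lines : Prop := ∀ (lines : List String), Dom_join_split_lines lines → Spec_join_split_lines lines (join_split_lines lines)

-- ===== LEMMAS AND PROOFS =====

-- A with a "pending" previous line x not yet emitted (B's result[-1]).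
def pvJoinAux (x : String) (ls : List String) : List String :=
  match ls with
  | [] => [x]
  | y :: rest =>
      if PySem.Str.strip y == "Hours" && PySem.Str.strip x == "Office" then
        "Office Hours" :: join_split_lines rest
      else
        x :: pvJoinAux y rest

theorem pvJoinAux_eq (x : String) (ls : List String) :
    pvJoinAux x ls = join_split_lines (x :: ls) := by
  induction ls generalizing x with
  | nil => rfl
  | cons y rest ih =>
      simp only [pvJoinAux, join_split_lines, Bool.and_comm, ih]

theorem pvFoldl_eq (ls : List String) (x : String) (acc : List String) :
    (ls.foldl join_split_lines_step (x :: acc)).reverse = acc.reverse ++ pvJoinAux x ls := by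
  induction ls generalizing x acc with
  | nil => simp [pvJoinAux]
  | cons y rest ih =>
      simp only [List.foldl_cons, join_split_lines_step, pvJoinAux]
      by_cases h : (PySem.Str.strip y == "Hours" && PySem.Str.strip x == "Office") = true
      · simp only [h, if_true, ih, pvJoinAux_eq]
        have hOH : join_split_lines ("Office Hours" :: rest) = "Office Hours" :: join_split_lines rest := by
          cases rest with
          | nil => rfl
          | cons z rs =>
              have : (PySem.Str.strip "Office Hours" == "Office") = false := by decide
              simp [join_split_lines, this]
        rw [hOH]
      · simp only [if_neg h]
        rw [ih y (x :: acc)]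
        simp

theorem join_split_lines_spec : Claim_equal_join_split_lines := by
  intro lines _
  unfold Spec_join_split_lines join_split_lines_alt
  cases lines with
  | nil => rfl
  | cons x rest =>
      have h0 : join_split_lines_step [] x = [x] := rfl
      rw [List.foldl_cons, h0, pvFoldl_eq]
      simp [pvJoinAux_eq]
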